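-- pv_equiv track=rewrite | github.com/AlexTuisov/HW3 | HW3_submission/7_submission/hw3.py | get_action_combinations
-- ===== SOURCE A (Python) =====
-- from itertools import combinations
--
-- def get_action_combinations(zone_of_control, board, to_the_power_of, state_code):
--     code_positions = []
--     for (i, j) in zone_of_control:
--         if state_code in board[i][j]:
--             code_positions.append((i, j))
--
--     # find the limited power-set of actions with the positions in hand
--     s = list(code_positions)
--     for r in range(to_the_power_of + 1)[::-1]:
--         combs = list(combinations(s, r))
--
--         if len(combs) > 0:
--             return combs
-- ===== SOURCE B (Python) =====
-- def _comb(s, r):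
--     # all r-element subsequences of s, in index-lexicographic order
--     if r == 0:
--         return [()]
--     if not s:
--         return []
--     head, rest = s[0], s[1:]
--     return [(head,) + c for c in _comb(rest, r - 1)] + _comb(rest, r)
--
-- def get_action_combinations(zone_of_control, board, to_the_power_of, state_code):
--     positions = [(i, j) for (i, j) in zone_of_control if state_code in board[i][j]]
--     r = min(to_the_power_of, len(positions))
--     return _comb(positions, r)
-- ===== Notes on version B (the rewrite author's own statement) =====
-- stated objective: faster
-- what changed: Replaces A's descending search loop (which materializes a full itertools.combinations list for every r from to_the_power_of down until one is non-empty) with the closed form r = min(to_the_power_of, len(positions)) and a hand-written recursive generator producing the r-subsets directly by the take-or-skip recursion.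
-- outside the precondition, e.g. on get_action_combinations([(0, 0)], [['b']], -1, 'a'): A returns None, B returns []
import Mathlib
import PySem

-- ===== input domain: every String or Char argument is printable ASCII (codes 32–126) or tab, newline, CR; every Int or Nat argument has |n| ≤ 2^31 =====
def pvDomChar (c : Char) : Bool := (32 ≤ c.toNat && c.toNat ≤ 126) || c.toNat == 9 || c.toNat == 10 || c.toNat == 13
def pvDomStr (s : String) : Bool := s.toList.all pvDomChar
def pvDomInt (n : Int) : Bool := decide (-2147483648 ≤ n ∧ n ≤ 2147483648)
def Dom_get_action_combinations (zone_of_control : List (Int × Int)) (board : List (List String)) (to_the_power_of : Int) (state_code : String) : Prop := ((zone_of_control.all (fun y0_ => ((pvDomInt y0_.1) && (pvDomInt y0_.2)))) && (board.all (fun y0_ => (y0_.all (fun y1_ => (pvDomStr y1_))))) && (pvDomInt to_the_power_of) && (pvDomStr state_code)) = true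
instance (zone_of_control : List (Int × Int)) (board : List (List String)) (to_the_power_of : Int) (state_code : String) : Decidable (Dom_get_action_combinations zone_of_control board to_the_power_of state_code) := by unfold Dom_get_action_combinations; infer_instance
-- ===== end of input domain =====

-- B replaces A's descending search loop over r (one itertools list per r) by the closed form
-- r = min(to_the_power_of, len(positions)) and a hand-written take-or-skip recursion generating
-- the r-subsets directly; objective: faster (measured).


-- board[i][j] (Python indexing, negative wraps; "" only outside Pre_, where the cell lookup raises in Python)
def pvCell (board : List (List String)) (p : Int × Int) : String :=
  ((PySem.List.pyGet? board p.1).bind (fun row => PySem.List.pyGet? row p.2)).getD ""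

-- ===== PORT A =====
-- the descending loop: for r in range(to_the_power_of + 1)[::-1]: combs = combinations(s, r); if non-empty, return
def gacLoopA (s : List (Int × Int)) : Nat → List (List (Int × Int))
  | 0 => PySem.List.combinations s 0
  | r + 1 =>
    let combs := PySem.List.combinations s (r + 1)
    if combs.length > 0 then combs else gacLoopA s r

def get_action_combinations (zone_of_control : List (Int × Int)) (board : List (List String)) (to_the_power_of : Int) (state_code : String) : List (List (Int × Int)) :=
  let code_positions := zone_of_control.foldl
    (fun acc p => if PySem.Str.isIn state_code (pvCell board p) then acc ++ [p] else acc) []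
  -- to_the_power_of < 0: Python's range is empty and A falls through returning None (outside Pre_)
  if to_the_power_of < 0 then [] else gacLoopA code_positions to_the_power_of.toNat

-- ===== PORT B =====
-- Source B's _comb: take-or-skip recursion on the position list (r is a Python int)
def combB (s : List (Int × Int)) (r : Int) : List (List (Int × Int)) :=
  if r = 0 then [[]]
  else
    match s with
    | [] => []
    | head :: rest => ((combB rest (r - 1)).map (head :: ·)) ++ combB rest r

def get_action_combinations_alt (zone_of_control : List (Int × Int)) (board : List (List String)) (to_the_power_of : Int) (state_code : String) : List (List (Int × Int)) :=
  let positions := zone_of_control.filter (fun p => PySem.Str.isIn state_code (pvCell board p))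
  combB positions (min to_the_power_of (positions.length : Int))

-- ===== PRECONDITION & SPEC =====
-- Pre_ excludes to_the_power_of < 0, where A returns None (not a list of tuples; B returns []),
-- and positions whose board lookup raises IndexError in A.
def Pre_get_action_combinations (zone_of_control : List (Int × Int)) (board : List (List String)) (to_the_power_of : Int) (state_code : String) : Prop :=
  0 ≤ to_the_power_of ∧
  ∀ p ∈ zone_of_control, ((PySem.List.pyGet? board p.1).bind (fun row => PySem.List.pyGet? row p.2)).isSome = true
instance (zone_of_control : List (Int × Int)) (board : List (List String)) (to_the_power_of : Int) (state_code : String) : Decidable (Pre_get_action_combinations zone_of_control board to_the_power_of state_code) := by unfold Pre_get_action_combinations; infer_instance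

def pvWitness_get_action_combinations : (List (Int × Int)) × List (List String) × Int × String :=
  ([(0, 0), (0, 1), (1, 0)], ([["ab", "b"], ["a", "c"]], (2, "a")))

def Spec_get_action_combinations (zone_of_control : List (Int × Int)) (board : List (List String)) (to_the_power_of : Int) (state_code : String) (out : List (List (Int × Int))) : Prop := out = get_action_combinations_alt zone_of_control board to_the_power_of state_code
instance (zone_of_control : List (Int × Int)) (board : List (List String)) (to_the_power_of : Int) (state_code : String) (out : List (List (Int × Int))) : Decidable (Spec_get_action_combinations zone_of_control board to_the_power_of state_code out) := by unfold Spec_get_action_combinations; infer_instance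

-- ===== CLAIM (what is proved, stated in full; the proofs are below) =====
def Claim_equal_get_action_combinations : Prop := ∀ (zone_of_control : List (Int × Int)) (board : List (List String)) (to_the_power_of : Int) (state_code : String), Dom_get_action_combinations zone_of_control board to_the_power_of state_code → Pre_get_action_combinations zone_of_control board to_the_power_of state_code → Spec_get_action_combinations zone_of_control board to_the_power_of state_code (get_action_combinations zone_of_control board to_the_power_of state_code)

-- ===== LEMMAS AND PROOFS =====

theorem combinations_ne_nil_of_le {α : Type} (s : List α) (r : Nat) (h : r ≤ s.length) :
    PySem.List.combinations s r ≠ [] := by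
  intro hnil
  have hmem : s.take r ∈ PySem.List.combinations s r := by
    rw [PySem.List.mem_combinations_iff]
    exact ⟨List.take_sublist r s, by simp [List.length_take, Nat.min_eq_left h]⟩
  rw [hnil] at hmem
  exact List.not_mem_nil hmem

theorem gacLoopA_eq_min (s : List (Int × Int)) (t : Nat) :
    gacLoopA s t = PySem.List.combinations s (min t s.length) := by
  induction t with
  | zero => simp [gacLoopA]
  | succ r ih =>
    by_cases h : s.length < r + 1
    · have hnil : PySem.List.combinations s (r + 1) = [] :=
        PySem.List.combinations_eq_nil_of_length_lt (xs := s) h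
      have hmin : min (r + 1) s.length = min r s.length := by omega
      simp [gacLoopA, hnil, hmin, ih]
    · have hne := combinations_ne_nil_of_le s (r + 1) (by omega)
      have hlen : 0 < (PySem.List.combinations s (r + 1)).length :=
        List.length_pos_of_ne_nil hne
      have hmin : min (r + 1) s.length = r + 1 := by omega
      simp [gacLoopA, hlen, hmin]

theorem combB_eq_combinations (s : List (Int × Int)) (r : Int) (h : 0 ≤ r) :
    combB s r = PySem.List.combinations s r.toNat := by
  induction s generalizing r with
  | nil =>
    by_cases h0 : r = 0
    · simp [combB, h0, PySem.List.combinations_zero]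
    · have : ∃ k, r.toNat = k + 1 := ⟨r.toNat - 1, by omega⟩
      obtain ⟨k, hk⟩ := this
      simp [combB, h0, hk, PySem.List.combinations_nil_succ]
  | cons x xs ih =>
    by_cases h0 : r = 0
    · simp [combB, h0, PySem.List.combinations_zero]
    · have hk : r.toNat = (r - 1).toNat + 1 := by omega
      rw [combB, if_neg h0, hk, PySem.List.combinations_cons_succ,
        ih (r - 1) (by omega), ih r h, hk]

-- ===== VERDICT (by name: the statement is the Claim_ definition above) =====
theorem get_action_combinations_spec : Claim_equal_get_action_combinations := by
  intro zone board t code _ hpre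
  obtain ⟨ht, _⟩ := hpre
  unfold Spec_get_action_combinations get_action_combinations get_action_combinations_alt
  rw [PySem.List.foldl_append_if_eq_filter]
  have hneg : ¬ t < 0 := by omega
  simp only [hneg, if_false, List.nil_append]
  rw [gacLoopA_eq_min, combB_eq_combinations _ _ (by omega)]
  congr 1
  omega
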